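-- pv_equiv track=rewrite | github.com/demisto/content | Packs/ArgusMangedDefence/Integrations/ArgusManagedDefence/ArgusManagedDefence.py | build_argus_priority_from_min_severity
-- ===== SOURCE A (Python) =====
-- from typing import Any, Dict, Tuple, List, Optional, Union, cast
--
-- def argus_priority_to_demisto_severity(priority: str) -> int:
--     mapping = {"low": 1, "medium": 2, "high": 3, "critical": 4}
--     return mapping.get(priority, 0)
--
-- def build_argus_priority_from_min_severity(min_severity: str) -> List[str]:
--     severities = ["low", "medium", "high", "critical"]
--     min_severity_list = []
--     for severity in severities:
--         if argus_priority_to_demisto_severity(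
--             min_severity.lower()
--         ) <= argus_priority_to_demisto_severity(severity):
--             min_severity_list.append(severity)
--     return min_severity_list
-- ===== SOURCE B (Python) =====
-- from typing import List
--
-- def argus_priority_to_demisto_severity(priority: str) -> int:
--     mapping = {"low": 1, "medium": 2, "high": 3, "critical": 4}
--     return mapping.get(priority, 0)
--
-- def build_argus_priority_from_min_severity(min_severity: str) -> List[str]:
--     severities = ["low", "medium", "high", "critical"]
--     v = argus_priority_to_demisto_severity(min_severity.lower())
--     return severities[(v - 1 if v else 0):]
-- ===== Notes on version B (the rewrite author's own statement) =====
-- stated objective: simpler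
-- what changed: Replaces the per-element scan comparing mapped severities with a single threshold lookup and a closed-form slice of the fixed severity list (unknown severities map to offset 0, returning all four).
import Mathlib
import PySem

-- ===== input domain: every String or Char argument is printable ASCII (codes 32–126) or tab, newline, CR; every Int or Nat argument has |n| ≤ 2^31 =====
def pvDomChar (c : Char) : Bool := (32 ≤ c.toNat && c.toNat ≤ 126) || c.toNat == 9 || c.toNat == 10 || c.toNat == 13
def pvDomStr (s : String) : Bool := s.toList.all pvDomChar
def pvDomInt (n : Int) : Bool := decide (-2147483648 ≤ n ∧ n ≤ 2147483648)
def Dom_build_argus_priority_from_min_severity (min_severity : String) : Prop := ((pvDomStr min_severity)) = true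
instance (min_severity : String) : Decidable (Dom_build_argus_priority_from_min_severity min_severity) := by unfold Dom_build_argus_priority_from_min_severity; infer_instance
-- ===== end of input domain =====

-- B replaces the per-element scan-and-compare with one threshold lookup and a closed-form slice (objective: simpler).
-- ===== PORT A =====
def argus_priority_to_demisto_severity (priority : String) : Int :=
  (PySem.Dict.ofList [("low", (1:Int)), ("medium", 2), ("high", 3), ("critical", 4)]).getD priority 0

def build_argus_priority_from_min_severity (min_severity : String) : List String :=
  let severities := ["low", "medium", "high", "critical"]
  let min_severity_list : List String := []
  severities.foldl (fun min_severity_list severity =>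
    if argus_priority_to_demisto_severity (PySem.Str.lower min_severity)
        ≤ argus_priority_to_demisto_severity severity
    then min_severity_list ++ [severity] else min_severity_list) min_severity_list

-- ===== PORT B =====
def build_argus_priority_from_min_severity_alt (min_severity : String) : List String :=
  let severities := ["low", "medium", "high", "critical"]
  let v := argus_priority_to_demisto_severity (PySem.Str.lower min_severity)
  PySem.List.slice severities (some (if v != 0 then v - 1 else 0)) none

-- ===== PRECONDITION & SPEC =====
def Spec_build_argus_priority_from_min_severity (min_severity : String) (out : List String) : Prop := out = build_argus_priority_from_min_severity_alt min_severity
instance (min_severity : String) (out : List String) : Decidable (Spec_build_argus_priority_from_min_severity min_severity out) := by unfold Spec_build_argus_priority_from_min_severity; infer_instance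

-- ===== CLAIM (what is proved, stated in full; the proofs are below) =====
def Claim_equal_build_argus_priority_from_min_severity : Prop := ∀ (min_severity : String), Dom_build_argus_priority_from_min_severity min_severity → Spec_build_argus_priority_from_min_severity min_severity (build_argus_priority_from_min_severity min_severity)

-- ===== LEMMAS AND PROOFS =====

-- ===== VERDICT (by name: the statement is the Claim_ definition above) =====
lemma prio_cases (s : String) :
    argus_priority_to_demisto_severity s = 0 ∨ argus_priority_to_demisto_severity s = 1 ∨
    argus_priority_to_demisto_severity s = 2 ∨ argus_priority_to_demisto_severity s = 3 ∨
    argus_priority_to_demisto_severity s = 4 := by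
  by_cases h1 : s = "low"
  · subst h1; decide
  by_cases h2 : s = "medium"
  · subst h2; decide
  by_cases h3 : s = "high"
  · subst h3; decide
  by_cases h4 : s = "critical"
  · subst h4; decide
  left
  simp [argus_priority_to_demisto_severity, PySem.Dict.ofList, PySem.Dict.getD, PySem.Dict.get?,
    PySem.Dict.empty, PySem.Dict.update, PySem.Dict.insert, List.find?,
    beq_eq_false_iff_ne.mpr (Ne.symm h1), beq_eq_false_iff_ne.mpr (Ne.symm h2),
    beq_eq_false_iff_ne.mpr (Ne.symm h3), beq_eq_false_iff_ne.mpr (Ne.symm h4)]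

theorem build_argus_priority_from_min_severity_spec : Claim_equal_build_argus_priority_from_min_severity := by
  unfold Claim_equal_build_argus_priority_from_min_severity
  intro ms _
  unfold Spec_build_argus_priority_from_min_severity
  unfold build_argus_priority_from_min_severity build_argus_priority_from_min_severity_alt
  rcases prio_cases (PySem.Str.lower ms) with h | h | h | h | h <;> rw [h] <;> decide
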